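-- pv_equiv track=rewrite | github.com/NikitaFedyanin/python_tests | checkio/oreilly/simple/sort_except_zero.py | except_zero
-- ===== SOURCE A (Python) =====
-- from collections.abc import Iterable
--
-- def except_zero(items: list[int]) -> Iterable[int]:
--     indexes = []
--     new_items = []
--     for i, v in enumerate(items):
--         if v == 0:
--             indexes.append(i)
--         else:
--             new_items.append(v)
--     new_items.sort()
--     for i in indexes:
--         new_items.insert(i, 0)
--
--     return new_items
-- ===== SOURCE B (Python) =====
-- def except_zero(items: list[int]):
--     it = iter(sorted(v for v in items if v != 0))
--     return [0 if v == 0 else next(it) for v in items]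
-- ===== Notes on version B (the rewrite author's own statement) =====
-- stated objective: simpler
-- what changed: Instead of collecting zero indexes, sorting the nonzeros and re-inserting a zero at each saved index, B sorts the nonzeros once and rebuilds the list in a single comprehension that keeps zeros and consumes the sorted values in order.
import Mathlib
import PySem

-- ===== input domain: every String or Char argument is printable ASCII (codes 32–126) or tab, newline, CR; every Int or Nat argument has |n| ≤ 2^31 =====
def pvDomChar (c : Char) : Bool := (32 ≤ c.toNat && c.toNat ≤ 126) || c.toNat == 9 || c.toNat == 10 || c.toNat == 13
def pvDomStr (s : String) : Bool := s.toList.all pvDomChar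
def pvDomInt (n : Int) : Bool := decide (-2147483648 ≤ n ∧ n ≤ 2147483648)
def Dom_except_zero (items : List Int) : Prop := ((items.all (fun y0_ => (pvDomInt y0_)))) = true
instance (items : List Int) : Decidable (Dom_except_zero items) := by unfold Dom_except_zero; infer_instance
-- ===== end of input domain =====

-- B replaces A's collect-indexes / sort / re-insert-zeros scheme by one pass that keeps
-- zeros in place and consumes the sorted nonzero values in order (objective: simpler).

-- ===== PORT A =====
def except_zero (items : List Int) : List Int :=
  -- indexes / new_items accumulated over enumerate(items)
  let st := (PySem.List.enumerate items).foldl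
    (fun (st : List Int × List Int) iv =>
      if iv.2 == 0 then (st.1 ++ [iv.1], st.2) else (st.1, st.2 ++ [iv.2]))
    ([], [])
  -- new_items.sort()
  let new_items := PySem.List.sorted st.2 (fun x => x) false
  -- for i in indexes: new_items.insert(i, 0)
  st.1.foldl (fun acc i => PySem.List.insert acc i 0) new_items

-- ===== PORT B =====
-- the comprehension: keep each 0, otherwise take the next value of the sorted-nonzeros iterator
def fillSorted : List Int → List Int → List Int
  | [], _ => []
  | v :: rest, vals =>
    if v == 0 then 0 :: fillSorted rest vals
    else match vals with
      | h :: t => h :: fillSorted rest t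
      | [] => []  -- unreachable: vals holds exactly one value per nonzero of the list

def except_zero_alt (items : List Int) : List Int :=
  fillSorted items (PySem.List.sorted (items.filter (fun v => !(v == 0))) (fun x => x) false)

-- ===== PRECONDITION & SPEC =====
def Spec_except_zero (items : List Int) (out : List Int) : Prop := out = except_zero_alt items
instance (items : List Int) (out : List Int) : Decidable (Spec_except_zero items out) := by unfold Spec_except_zero; infer_instance

-- ===== CLAIM (what is proved, stated in full; the proofs are below) =====
def Claim_equal_except_zero : Prop := ∀ (items : List Int), Dom_except_zero items → Spec_except_zero items (except_zero items)

-- ===== LEMMAS AND PROOFS =====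

/-- Indices (as Ints, starting at offset `s`) of the zeros of a list. -/
def zeroIdx : List Int → Nat → List Int
  | [], _ => []
  | v :: rest, s => if v == 0 then (s : Int) :: zeroIdx rest (s + 1) else zeroIdx rest (s + 1)

/-- The first loop of A collects exactly the zero indices and the nonzero values. -/
theorem fold_enum (items : List Int) (s : Nat) (idxs nzs : List Int) :
    (PySem.List.enumerate items (s : Int)).foldl
      (fun (st : List Int × List Int) iv =>
        if iv.2 == 0 then (st.1 ++ [iv.1], st.2) else (st.1, st.2 ++ [iv.2]))
      (idxs, nzs)
    = (idxs ++ zeroIdx items s, nzs ++ items.filter (fun v => !(v == 0))) := by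
  induction items generalizing s idxs nzs with
  | nil => simp [PySem.List.enumerate_nil, zeroIdx]
  | cons v rest ih =>
    rw [PySem.List.enumerate_cons]
    by_cases hv : v = 0
    · have : ((s : Int) + 1) = ((s + 1 : Nat) : Int) := by push_cast; ring
      simp only [List.foldl_cons, hv]
      rw [this, ih]
      simp [zeroIdx]
    · have : ((s : Int) + 1) = ((s + 1 : Nat) : Int) := by push_cast; ring
      simp only [List.foldl_cons]
      rw [this, ih]
      simp [zeroIdx, hv]

/-- Inserting 0 at the (absolute) zero indices into `pre ++ vals` fills the zeros back
in place, provided `vals` has one value per nonzero. -/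
theorem insert_fold (items : List Int) (s : Nat) (pre vals : List Int)
    (hpre : pre.length = s)
    (hv : vals.length = (items.filter (fun v => !(v == 0))).length) :
    (zeroIdx items s).foldl (fun acc i => PySem.List.insert acc i 0) (pre ++ vals)
    = pre ++ fillSorted items vals := by
  induction items generalizing s pre vals with
  | nil =>
    have : vals = [] := by
      simpa using List.eq_nil_of_length_eq_zero (by simpa using hv)
    simp [zeroIdx, fillSorted, this]
  | cons v rest ih =>
    by_cases hvz : v = 0
    · subst hvz
      simp only [zeroIdx]
      rw [if_pos (show ((0 : Int) == 0) = true from rfl)]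
      simp only [List.foldl_cons]
      have hins : PySem.List.insert (pre ++ vals) (s : Int) 0 = (pre ++ [0]) ++ vals := by
        rw [PySem.List.insert_natCast _ s _ (by simp [hpre])]
        rw [← hpre]
        simp
      rw [hins, ih (s + 1) (pre ++ [0]) vals (by simp [hpre])
            (by simpa [List.filter_cons] using hv)]
      simp [fillSorted]
    · have hfil : (List.filter (fun v => !(v == 0)) (v :: rest))
          = v :: List.filter (fun v => !(v == 0)) rest := by
        simp [hvz]
      rw [hfil] at hv
      obtain ⟨h, t, rfl⟩ : ∃ h t, vals = h :: t := by
        cases vals with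
        | nil => simp at hv
        | cons h t => exact ⟨h, t, rfl⟩
      simp only [zeroIdx]
      rw [if_neg (show ¬ ((v == 0) = true) by simp [hvz])]
      have : pre ++ h :: t = (pre ++ [h]) ++ t := by simp
      rw [this, ih (s + 1) (pre ++ [h]) t (by simp [hpre]) (by simpa using hv)]
      simp [fillSorted, hvz]

-- ===== VERDICT (by name: the statement is the Claim_ definition above) =====
theorem except_zero_spec : Claim_equal_except_zero := by
  intro items _
  unfold Spec_except_zero except_zero except_zero_alt
  have hf := fold_enum items 0 [] []
  simp only [Nat.cast_zero, List.nil_append] at hf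
  have h2 := insert_fold items 0 []
      (PySem.List.sorted (items.filter (fun v => !(v == 0))) (fun x => x) false)
      rfl (by simp [PySem.List.length_sorted])
  simp only [hf]
  simpa using h2
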